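-- pv_equiv track=rewrite | github.com/mynameisD/Algorithms | googleCodeJam/2010_1A/rotate.py | search
-- ===== SOURCE A (Python) =====
-- def search(q, color, k):
--     if not q: return False
--     for i in range(len(q)):
--         if not q[i]: continue
--         for j in range(len(q[i])):
--             if q[i][j] == color:
--                 if any([dfs(q,i,j,k,color,0,1),dfs(q,i,j,k,color,1,-1),dfs(q,i,j,k,color,1,1),dfs(q,i,j,k,color,1,0)]): return True
--     return False
--
-- def dfs(q,i,j,n,col,dx,dy):
--     if n == 0:
--         return True
--     if i >= len(q) or not q[i] or  j < 0 or j >=len(q[i]) or q[i][j] != col: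
--         return False
--     return dfs(q,i+dx,j+dy,n-1,col,dx,dy)
-- ===== SOURCE B (Python) =====
-- def search(q, color, k):
--     # One pass over the grid: run-length DP per direction (horizontal in-row,
--     # vertical / both diagonals via per-column dicts carried from the previous row).
--     v, d, a = {}, {}, {}
--     for row in q:
--         nv, nd, na = {}, {}, {}
--         run = 0
--         for j, x in enumerate(row):
--             if x == color:
--                 run += 1
--                 nv[j] = v.get(j, 0) + 1
--                 nd[j] = d.get(j - 1, 0) + 1
--                 na[j] = a.get(j + 1, 0) + 1
--                 if run >= k or nv[j] >= k or nd[j] >= k or na[j] >= k: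
--                     return True
--             else:
--                 run = 0
--         v, d, a = nv, nd, na
--     return False
-- ===== Notes on version B (the rewrite author's own statement) =====
-- stated objective: alternative
-- what changed: A probes every color cell with four recursive length-k directional walks; B instead makes a single pass over the grid maintaining run-length DP counters (a horizontal run plus per-column dicts carrying vertical and both diagonal runs from the previous row) and fires when a counter reaches k.
-- outside the precondition, e.g. on search([[1, 1]], 1, -1): A returns False, B returns True
import Mathlib
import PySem

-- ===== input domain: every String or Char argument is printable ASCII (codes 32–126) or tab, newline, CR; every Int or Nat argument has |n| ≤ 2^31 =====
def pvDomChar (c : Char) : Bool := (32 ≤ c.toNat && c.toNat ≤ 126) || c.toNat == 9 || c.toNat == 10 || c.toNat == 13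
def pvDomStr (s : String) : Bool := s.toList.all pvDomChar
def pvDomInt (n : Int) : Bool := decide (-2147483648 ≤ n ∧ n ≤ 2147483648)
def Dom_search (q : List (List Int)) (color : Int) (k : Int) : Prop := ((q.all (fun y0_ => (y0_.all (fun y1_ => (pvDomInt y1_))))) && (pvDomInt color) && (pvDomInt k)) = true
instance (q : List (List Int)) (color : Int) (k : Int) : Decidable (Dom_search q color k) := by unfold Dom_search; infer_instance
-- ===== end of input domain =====

-- B replaces A's four recursive length-k probes per color cell by one run-length-DP pass (alternative algorithm, same measured cost).

-- ===== PORT A =====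
-- dfs(q,i,j,n,col,dx,dy): fuel only makes the recursion structurally total; one unit is
-- consumed per recursive call, and search passes k.toNat+1, enough for every n = k ≥ 0.
def dfsA (q : List (List Int)) (i j n col dx dy : Int) : Nat → Bool
  | 0 => false
  | fuel+1 =>
    if n = 0 then true
    else
      let row := q.getD i.toNat []
      if (q.length : Int) ≤ i ∨ row = [] ∨ j < 0 ∨ (row.length : Int) ≤ j ∨ ¬ (row.getD j.toNat 0 = col)
      then false
      else dfsA q (i+dx) (j+dy) (n-1) col dx dy fuel

def search (q : List (List Int)) (color : Int) (k : Int) : Bool :=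
  if q = [] then false else
  (List.range q.length).any (fun i =>
    let row := q.getD i []
    if row = [] then false else
    (List.range row.length).any (fun j =>
      if row.getD j 0 = color then
        dfsA q i j k color 0 1 (k.toNat+1) || dfsA q i j k color 1 (-1) (k.toNat+1) ||
        dfsA q i j k color 1 1 (k.toNat+1) || dfsA q i j k color 1 0 (k.toNat+1)
      else false))

-- ===== PORT B =====
-- inner loop of Source B: `for j, x in enumerate(row)` with early return; state (run, nv, nd, na)
def rowLoopB (color k : Int) (v d a : PySem.Dict Int Int) :
    List Int → Int → Int → PySem.Dict Int Int → PySem.Dict Int Int → PySem.Dict Int Int →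
    Bool × PySem.Dict Int Int × PySem.Dict Int Int × PySem.Dict Int Int
  | [], _, _, nv, nd, na => (false, nv, nd, na)
  | x :: xs, j, run, nv, nd, na =>
    if x = color then
      let run' := run + 1
      let rv := v.getD j 0 + 1
      let rd := d.getD (j - 1) 0 + 1
      let ra := a.getD (j + 1) 0 + 1
      if k ≤ run' ∨ k ≤ rv ∨ k ≤ rd ∨ k ≤ ra then
        (true, nv.insert j rv, nd.insert j rd, na.insert j ra)
      else rowLoopB color k v d a xs (j + 1) run' (nv.insert j rv) (nd.insert j rd) (na.insert j ra)
    else rowLoopB color k v d a xs (j + 1) 0 nv nd na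

-- outer loop of Source B: `for row in q`, carrying the three per-column dicts
def gridLoopB (color k : Int) : List (List Int) → PySem.Dict Int Int → PySem.Dict Int Int → PySem.Dict Int Int → Bool
  | [], _, _, _ => false
  | row :: rest, v, d, a =>
    match rowLoopB color k v d a row 0 0 PySem.Dict.empty PySem.Dict.empty PySem.Dict.empty with
    | (true, _, _, _) => true
    | (false, nv, nd, na) => gridLoopB color k rest nv nd na

def search_alt (q : List (List Int)) (color : Int) (k : Int) : Bool :=
  gridLoopB color k q PySem.Dict.empty PySem.Dict.empty PySem.Dict.empty

-- ===== PRECONDITION & SPEC =====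
-- Pre_ excludes negative k, outside the natural domain of a required run length: A happens to
-- return False there, while B's run-length test `run >= k` is trivially met at any color cell.
def Pre_search (q : List (List Int)) (color : Int) (k : Int) : Prop := 0 ≤ k
instance (q : List (List Int)) (color : Int) (k : Int) : Decidable (Pre_search q color k) := by unfold Pre_search; infer_instance
def pvWitness_search : List (List Int) × Int × Int := ([[1, 0], [0, 1]], 1, 2)

def Spec_search (q : List (List Int)) (color : Int) (k : Int) (out : Bool) : Prop := out = search_alt q color k
instance (q : List (List Int)) (color : Int) (k : Int) (out : Bool) : Decidable (Spec_search q color k out) := by unfold Spec_search; infer_instance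

-- ===== CLAIM (what is proved, stated in full; the proofs are below) =====
def Claim_equal_search : Prop := ∀ (q : List (List Int)) (color : Int) (k : Int), Dom_search q color k → Pre_search q color k → Spec_search q color k (search q color k)

-- ===== LEMMAS AND PROOFS =====

-- cell (i,j) is inside the grid and holds `col`
def cm (q : List (List Int)) (col : Int) (i : Nat) (j : Int) : Bool :=
  decide (i < q.length) && decide (0 ≤ j) && decide (j < ((q.getD i []).length : Int)) &&
  decide ((q.getD i []).getD j.toNat 0 = col)

-- backward run ending at (i,j), stepping to row i-1 and column j+dc
def brun (q : List (List Int)) (col : Int) (dc : Int) : Nat → Int → Nat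
  | 0, j => if cm q col 0 j then 1 else 0
  | i+1, j => if cm q col (i+1) j then brun q col dc i (j + dc) + 1 else 0

-- horizontal run ending at (i,j), stepping left
def hrun (q : List (List Int)) (col : Int) (i : Nat) : Nat → Nat
  | 0 => if cm q col i 0 then 1 else 0
  | j+1 => if cm q col i ((j : Int)+1) then hrun q col i j + 1 else 0

-- previous-row value feeding brun
def prun (q : List (List Int)) (col : Int) (dc : Int) : Nat → Int → Nat
  | 0, _ => 0
  | i+1, j => brun q col dc i j

-- value just before processing column m
def hpre (q : List (List Int)) (col : Int) (i : Nat) : Nat → Nat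
  | 0 => 0
  | m+1 => hrun q col i m

-- B's firing condition at cell (i,j)
def hitB (q : List (List Int)) (col k : Int) (i j : Nat) : Prop :=
  cm q col i (j : Int) = true ∧
  (k ≤ (hrun q col i j : Int) ∨ k ≤ (brun q col 0 i (j : Int) : Int) ∨
   k ≤ (brun q col (-1) i (j : Int) : Int) ∨ k ≤ (brun q col 1 i (j : Int) : Int))

-- A's firing condition at cell (i,j) (n = k.toNat)
def fwdP (q : List (List Int)) (col : Int) (i : Nat) (j : Int) (dx : Nat) (dy : Int) (n : Nat) : Prop :=
  ∀ t < n, cm q col (i + t * dx) (j + t * dy) = true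

lemma guard_iff (q : List (List Int)) (col : Int) (i : Nat) (j : Int) :
    ((q.length : Int) ≤ (i : Int) ∨ q.getD ((i : Int)).toNat [] = [] ∨ j < 0 ∨
      ((q.getD ((i : Int)).toNat []).length : Int) ≤ j ∨
      ¬ ((q.getD ((i : Int)).toNat []).getD j.toNat 0 = col)) ↔ cm q col i j = false := by
  have ht : ((i : Int)).toNat = i := by simp
  rw [ht]
  unfold cm
  constructor
  · intro h
    rcases h with h | h | h | h | h
    · simp only [Bool.and_eq_false_iff]
      left; left; left
      simp only [decide_eq_false_iff_not]
      omega
    · rcases lt_or_ge j 0 with hj | hj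
      · simp only [Bool.and_eq_false_iff]
        left; left; right
        simp only [decide_eq_false_iff_not]
        omega
      · simp only [Bool.and_eq_false_iff]
        left; right
        simp only [h, List.length_nil, decide_eq_false_iff_not]
        push_cast
        omega
    · simp only [Bool.and_eq_false_iff]
      left; left; right
      simp only [decide_eq_false_iff_not]
      omega
    · simp only [Bool.and_eq_false_iff]
      left; right
      simp only [decide_eq_false_iff_not]
      omega
    · simp only [Bool.and_eq_false_iff]
      right
      simp only [decide_eq_false_iff_not]
      exact h
  · intro h
    simp only [Bool.and_eq_false_iff, decide_eq_false_iff_not] at h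
    rcases h with ((h | h) | h) | h
    · left; omega
    · right; right; left; omega
    · right; right; right; left; omega
    · right; right; right; right; exact h

lemma fwd_succ (q : List (List Int)) (col : Int) (i : Nat) (j : Int) (dx : Nat) (dy : Int) (n : Nat) :
    fwdP q col i j dx dy (n+1) ↔ (cm q col i j = true ∧ fwdP q col (i+dx) (j+dy) dx dy n) := by
  constructor
  · intro h
    refine ⟨by simpa using h 0 (by omega), ?_⟩
    intro t ht
    have := h (t+1) (by omega)
    have e1 : i + (t+1) * dx = i + dx + t * dx := by ring
    have e2 : j + ((t+1 : Nat) : Int) * dy = (j + dy) + (t : Int) * dy := by push_cast; ring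
    rw [e1, e2] at this
    exact this
  · rintro ⟨h0, h⟩
    intro t ht
    cases t with
    | zero => simpa using h0
    | succ s =>
      have := h s (by omega)
      have e1 : i + (s+1) * dx = i + dx + s * dx := by ring
      have e2 : j + ((s+1 : Nat) : Int) * dy = (j + dy) + (s : Int) * dy := by push_cast; ring
      rw [e1, e2]
      exact this

def hitA (q : List (List Int)) (col : Int) (n : Nat) (i j : Nat) : Prop :=
  cm q col i (j : Int) = true ∧
  (fwdP q col i (j : Int) 0 1 n ∨ fwdP q col i (j : Int) 1 (-1) n ∨
   fwdP q col i (j : Int) 1 1 n ∨ fwdP q col i (j : Int) 1 0 n)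

lemma brun_eq (q : List (List Int)) (col dc : Int) (i : Nat) (j : Int) :
    brun q col dc i j = if cm q col i j then prun q col dc i (j + dc) + 1 else 0 := by
  cases i <;> simp [brun, prun]

lemma brun_zero (q : List (List Int)) (col dc : Int) (i : Nat) (j : Int)
    (h : cm q col i j = false) : brun q col dc i j = 0 := by
  rw [brun_eq, h]; simp

lemma hrun_eq (q : List (List Int)) (col : Int) (i m : Nat) :
    hrun q col i m = if cm q col i (m : Int) then hpre q col i m + 1 else 0 := by
  cases m <;> simp [hrun, hpre]

lemma dfsA_eq (q : List (List Int)) (col : Int) (dx : Nat) (dy : Int) :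
    ∀ (n fuel : Nat) (i : Nat) (j : Int), n < fuel →
      (dfsA q (i : Int) j (n : Int) col (dx : Int) dy fuel = true ↔ fwdP q col i j dx dy n) := by
  intro n
  induction n with
  | zero =>
    intro fuel i j hf
    obtain ⟨f, rfl⟩ : ∃ f, fuel = f + 1 := ⟨fuel - 1, by omega⟩
    simp [dfsA, fwdP]
  | succ n ih =>
    intro fuel i j hf
    obtain ⟨f, rfl⟩ : ∃ f, fuel = f + 1 := ⟨fuel - 1, by omega⟩
    rw [fwd_succ]
    have hne : ¬ (((n+1 : Nat) : Int) = 0) := by push_cast; omega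
    by_cases hcm : cm q col i j = true
    · have hg := (guard_iff q col i j).not.mpr (by simp [hcm])
      rw [show dfsA q (i : Int) j ((n+1 : Nat) : Int) col (dx : Int) dy (f+1)
            = dfsA q ((i : Int)+(dx : Int)) (j+dy) (((n+1 : Nat) : Int)-1) col (dx : Int) dy f from by
        simp only [dfsA]
        rw [if_neg hne, if_neg hg]]
      have e1 : ((i : Int)+(dx : Int)) = (((i+dx : Nat) : Nat) : Int) := by push_cast; ring
      have e2 : (((n+1 : Nat) : Int)-1) = ((n : Nat) : Int) := by push_cast; ring
      rw [e1, e2, ih f (i+dx) (j+dy) (by omega)]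
      simp [hcm]
    · have hg := (guard_iff q col i j).mpr (by simpa using hcm)
      rw [show dfsA q (i : Int) j ((n+1 : Nat) : Int) col (dx : Int) dy (f+1) = false from by
        simp only [dfsA]
        rw [if_neg hne, if_pos hg]]
      simp [hcm]

lemma cm_bounds (q : List (List Int)) (col : Int) (i : Nat) (j : Int) (h : cm q col i j = true) :
    i < q.length ∧ 0 ≤ j ∧ j < ((q.getD i []).length : Int) ∧ (q.getD i []).getD j.toNat 0 = col := by
  unfold cm at h
  simpa [and_assoc] using h

lemma cm_mk (q : List (List Int)) (col : Int) (i j : Nat) (hi : i < q.length)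
    (hj : j < (q.getD i []).length) (hval : (q.getD i []).getD j 0 = col) :
    cm q col i (j : Int) = true := by
  unfold cm
  simp only [Bool.and_eq_true, decide_eq_true_eq, Int.toNat_natCast]
  refine ⟨⟨⟨hi, by positivity⟩, by exact_mod_cast hj⟩, hval⟩

lemma search_iff (q : List (List Int)) (color k : Int) (hk : 0 ≤ k) :
    search q color k = true ↔ ∃ i j : Nat, hitA q color k.toNat i j := by
  have hkk : k = ((k.toNat : Nat) : Int) := (Int.toNat_of_nonneg hk).symm
  unfold search
  by_cases hq : q = []
  · subst hq
    simp [hitA, cm]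
  · rw [if_neg hq]
    simp only [List.any_eq_true, List.mem_range]
    constructor
    · rintro ⟨i, hi, h⟩
      split at h
      · exact absurd h (by simp)
      · rename_i hrow
        simp only [List.any_eq_true, List.mem_range] at h
        obtain ⟨j, hj, h⟩ := h
        split at h
        · rename_i hval
          have hcm := cm_mk q color i j hi hj hval
          rw [hkk] at h
          simp only [Int.toNat_natCast, Bool.or_eq_true] at h
          have d1 := dfsA_eq q color 0 1 k.toNat (k.toNat+1) i (j : Int) (by omega)
          have d2 := dfsA_eq q color 1 (-1) k.toNat (k.toNat+1) i (j : Int) (by omega)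
          have d3 := dfsA_eq q color 1 1 k.toNat (k.toNat+1) i (j : Int) (by omega)
          have d4 := dfsA_eq q color 1 0 k.toNat (k.toNat+1) i (j : Int) (by omega)
          simp only [Nat.cast_zero, Nat.cast_one] at d1 d2 d3 d4
          rw [d1, d2, d3, d4] at h
          refine ⟨i, j, ?_⟩
          unfold hitA
          refine ⟨hcm, ?_⟩
          rcases h with ((h | h) | h) | h
          · exact Or.inl h
          · exact Or.inr (Or.inl h)
          · exact Or.inr (Or.inr (Or.inl h))
          · exact Or.inr (Or.inr (Or.inr h))
        · exact absurd h (by simp)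
    · rintro ⟨i, j, hcm, hdirs⟩
      obtain ⟨hi, hj0, hjl, hval⟩ := cm_bounds q color i (j : Int) hcm
      have hjn : j < (q.getD i []).length := by exact_mod_cast hjl
      refine ⟨i, hi, ?_⟩
      rw [if_neg (by intro hrow; rw [hrow] at hjn; simp at hjn)]
      simp only [List.any_eq_true, List.mem_range]
      refine ⟨j, hjn, ?_⟩
      rw [if_pos (by simpa using hval)]
      rw [hkk]
      simp only [Int.toNat_natCast, Bool.or_eq_true]
      have d1 := dfsA_eq q color 0 1 k.toNat (k.toNat+1) i (j : Int) (by omega)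
      have d2 := dfsA_eq q color 1 (-1) k.toNat (k.toNat+1) i (j : Int) (by omega)
      have d3 := dfsA_eq q color 1 1 k.toNat (k.toNat+1) i (j : Int) (by omega)
      have d4 := dfsA_eq q color 1 0 k.toNat (k.toNat+1) i (j : Int) (by omega)
      simp only [Nat.cast_zero, Nat.cast_one] at d1 d2 d3 d4
      rw [d1, d2, d3, d4]
      rcases hdirs with h | h | h | h
      · exact Or.inl (Or.inl (Or.inl h))
      · exact Or.inl (Or.inl (Or.inr h))
      · exact Or.inl (Or.inr h)
      · exact Or.inr h

lemma cm_false_of_out (q : List (List Int)) (col : Int) (i : Nat) (j : Int)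
    (h : j < 0 ∨ ((q.getD i []).length : Int) ≤ j) : cm q col i j = false := by
  unfold cm
  rcases h with h | h
  · simp only [Bool.and_eq_false_iff, decide_eq_false_iff_not]
    left; left; right; omega
  · simp only [Bool.and_eq_false_iff, decide_eq_false_iff_not]
    left; right; omega

lemma hitB_at (q : List (List Int)) (color k : Int) (i m : Nat)
    (hcm : cm q color i (m : Int) = true) :
    hitB q color k i m ↔ (k ≤ (hrun q color i m : Int) ∨ k ≤ (brun q color 0 i (m : Int) : Int) ∨
      k ≤ (brun q color (-1) i (m : Int) : Int) ∨ k ≤ (brun q color 1 i (m : Int) : Int)) := by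
  unfold hitB
  simp [hcm]

lemma hitB_false (q : List (List Int)) (color k : Int) (i m : Nat)
    (hcm : cm q color i (m : Int) = false) : ¬ hitB q color k i m := by
  unfold hitB
  simp [hcm]

lemma rowLoop_terminal (q : List (List Int)) (color k : Int) (i : Nat)
    (nv nd na : PySem.Dict Int Int) (m : Nat) (hm : m = (q.getD i []).length)
    (hnv : ∀ j : Int, nv.getD j 0 = if 0 ≤ j ∧ j < (m : Int) then (brun q color 0 i j : Int) else 0)
    (hnd : ∀ j : Int, nd.getD j 0 = if 0 ≤ j ∧ j < (m : Int) then (brun q color (-1) i j : Int) else 0)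
    (hna : ∀ j : Int, na.getD j 0 = if 0 ≤ j ∧ j < (m : Int) then (brun q color 1 i j : Int) else 0)
    (v d a : PySem.Dict Int Int) (run : Int) (r : Bool × PySem.Dict Int Int × PySem.Dict Int Int × PySem.Dict Int Int)
    (hr : r = rowLoopB color k v d a ((q.getD i []).drop m) (m : Int) run nv nd na) :
    (r.1 = true ↔ ∃ j : Nat, m ≤ j ∧ hitB q color k i j) ∧
    (r.1 = false →
      (∀ j : Int, r.2.1.getD j 0 = (brun q color 0 i j : Int)) ∧
      (∀ j : Int, r.2.2.1.getD j 0 = (brun q color (-1) i j : Int)) ∧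
      (∀ j : Int, r.2.2.2.getD j 0 = (brun q color 1 i j : Int))) := by
  rw [hm, List.drop_length] at hr
  simp only [rowLoopB] at hr
  subst hr
  have hfull : ∀ (dc : Int) (w : PySem.Dict Int Int),
      (∀ j : Int, w.getD j 0 = if 0 ≤ j ∧ j < (m : Int) then (brun q color dc i j : Int) else 0) →
      ∀ j : Int, w.getD j 0 = (brun q color dc i j : Int) := by
    intro dc w hw j
    rw [hw j]
    by_cases hj : 0 ≤ j ∧ j < (m : Int)
    · rw [if_pos hj]
    · rw [if_neg hj]
      rw [brun_zero q color dc i j (cm_false_of_out q color i j (by rw [← hm] at *; omega))]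
      simp
  constructor
  · simp only [Bool.false_eq_true, false_iff]
    rintro ⟨j, hj, hB⟩
    have hb := cm_bounds q color i (j : Int) hB.1
    have : j < (q.getD i []).length := by exact_mod_cast hb.2.2.1
    omega
  · intro _
    exact ⟨hfull 0 nv hnv, hfull (-1) nd hnd, hfull 1 na hna⟩

lemma rowLoop_iff (q : List (List Int)) (color k : Int) (i : Nat) (hi : i < q.length)
    (v d a : PySem.Dict Int Int)
    (hv : ∀ j : Int, v.getD j 0 = (prun q color 0 i j : Int))
    (hd : ∀ j : Int, d.getD j 0 = (prun q color (-1) i j : Int))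
    (ha : ∀ j : Int, a.getD j 0 = (prun q color 1 i j : Int)) :
    ∀ (fuel m : Nat), (q.getD i []).length - m ≤ fuel → m ≤ (q.getD i []).length →
      ∀ (nv nd na : PySem.Dict Int Int),
      (∀ j : Int, nv.getD j 0 = if 0 ≤ j ∧ j < (m : Int) then (brun q color 0 i j : Int) else 0) →
      (∀ j : Int, nd.getD j 0 = if 0 ≤ j ∧ j < (m : Int) then (brun q color (-1) i j : Int) else 0) →
      (∀ j : Int, na.getD j 0 = if 0 ≤ j ∧ j < (m : Int) then (brun q color 1 i j : Int) else 0) →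
      ∀ (r : Bool × PySem.Dict Int Int × PySem.Dict Int Int × PySem.Dict Int Int),
      r = rowLoopB color k v d a ((q.getD i []).drop m) (m : Int) ((hpre q color i m : Nat) : Int) nv nd na →
      ((r.1 = true ↔ ∃ j : Nat, m ≤ j ∧ hitB q color k i j) ∧
       (r.1 = false →
         (∀ j : Int, r.2.1.getD j 0 = (brun q color 0 i j : Int)) ∧
         (∀ j : Int, r.2.2.1.getD j 0 = (brun q color (-1) i j : Int)) ∧
         (∀ j : Int, r.2.2.2.getD j 0 = (brun q color 1 i j : Int)))) := by
  intro fuel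
  induction fuel with
  | zero =>
    intro m hfuel hm nv nd na hnv hnd hna r hr
    exact rowLoop_terminal q color k i nv nd na m (by omega) hnv hnd hna v d a _ r hr
  | succ f ih =>
    intro m hfuel hm nv nd na hnv hnd hna r hr
    rcases Nat.lt_or_ge m (q.getD i []).length with hlt | hge
    swap
    · exact rowLoop_terminal q color k i nv nd na m (by omega) hnv hnd hna v d a _ r hr
    rw [List.drop_eq_getElem_cons hlt] at hr
    simp only [rowLoopB] at hr
    by_cases hx : (q.getD i [])[m] = color
    · rw [if_pos hx] at hr
      have hcm : cm q color i (m : Int) = true :=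
        cm_mk q color i m hi hlt (by rw [List.getD_eq_getElem _ _ hlt]; exact hx)
      have hrun' : ((hpre q color i m : Nat) : Int) + 1 = ((hrun q color i m : Nat) : Int) := by
        rw [hrun_eq, if_pos hcm]; push_cast; ring
      have hrv : v.getD (m : Int) 0 + 1 = ((brun q color 0 i (m : Int) : Nat) : Int) := by
        rw [hv, brun_eq, if_pos hcm]; push_cast; ring
      have hrd : d.getD ((m : Int) - 1) 0 + 1 = ((brun q color (-1) i (m : Int) : Nat) : Int) := by
        rw [hd, brun_eq, if_pos hcm]
        rw [show (m : Int) + (-1) = (m : Int) - 1 by ring]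
        push_cast; ring
      have hra : a.getD ((m : Int) + 1) 0 + 1 = ((brun q color 1 i (m : Int) : Nat) : Int) := by
        rw [ha, brun_eq, if_pos hcm]; push_cast; ring
      rw [hrun', hrv, hrd, hra] at hr
      by_cases hcond : k ≤ ((hrun q color i m : Nat) : Int) ∨ k ≤ ((brun q color 0 i (m : Int) : Nat) : Int) ∨
          k ≤ ((brun q color (-1) i (m : Int) : Nat) : Int) ∨ k ≤ ((brun q color 1 i (m : Int) : Nat) : Int)
      · rw [if_pos hcond] at hr
        subst hr
        constructor
        · simp only [true_iff]
          exact ⟨m, le_refl m, (hitB_at q color k i m hcm).mpr hcond⟩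
        · intro h; cases h
      · rw [if_neg hcond] at hr
        have e1 : (m : Int) + 1 = ((m + 1 : Nat) : Int) := by push_cast; ring
        have e2 : ((hrun q color i m : Nat) : Int) = ((hpre q color i (m+1) : Nat) : Int) := by
          simp [hpre]
        rw [e1, e2] at hr
        have hnv' : ∀ j : Int, (nv.insert (m : Int) ((brun q color 0 i (m : Int) : Nat) : Int)).getD j 0 =
            if 0 ≤ j ∧ j < ((m + 1 : Nat) : Int) then (brun q color 0 i j : Int) else 0 := by
          intro j
          rw [PySem.Dict.getD_insert]
          by_cases hj : j = (m : Int)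
          · subst hj; rw [if_pos rfl, if_pos (by push_cast; omega)]
          · rw [if_neg hj, hnv j]
            by_cases hj2 : 0 ≤ j ∧ j < (m : Int)
            · rw [if_pos hj2, if_pos (by push_cast; omega)]
            · rw [if_neg hj2, if_neg (by push_cast; omega)]
        have hnd' : ∀ j : Int, (nd.insert (m : Int) ((brun q color (-1) i (m : Int) : Nat) : Int)).getD j 0 =
            if 0 ≤ j ∧ j < ((m + 1 : Nat) : Int) then (brun q color (-1) i j : Int) else 0 := by
          intro j
          rw [PySem.Dict.getD_insert]
          by_cases hj : j = (m : Int)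
          · subst hj; rw [if_pos rfl, if_pos (by push_cast; omega)]
          · rw [if_neg hj, hnd j]
            by_cases hj2 : 0 ≤ j ∧ j < (m : Int)
            · rw [if_pos hj2, if_pos (by push_cast; omega)]
            · rw [if_neg hj2, if_neg (by push_cast; omega)]
        have hna' : ∀ j : Int, (na.insert (m : Int) ((brun q color 1 i (m : Int) : Nat) : Int)).getD j 0 =
            if 0 ≤ j ∧ j < ((m + 1 : Nat) : Int) then (brun q color 1 i j : Int) else 0 := by
          intro j
          rw [PySem.Dict.getD_insert]
          by_cases hj : j = (m : Int)
          · subst hj; rw [if_pos rfl, if_pos (by push_cast; omega)]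
          · rw [if_neg hj, hna j]
            by_cases hj2 : 0 ≤ j ∧ j < (m : Int)
            · rw [if_pos hj2, if_pos (by push_cast; omega)]
            · rw [if_neg hj2, if_neg (by push_cast; omega)]
        obtain ⟨hiff, hdicts⟩ := ih (m+1) (by omega) (by omega) _ _ _ hnv' hnd' hna' r hr
        refine ⟨?_, hdicts⟩
        rw [hiff]
        constructor
        · rintro ⟨j, hj, hB⟩
          exact ⟨j, by omega, hB⟩
        · rintro ⟨j, hj, hB⟩
          rcases Nat.lt_or_ge j (m+1) with hj2 | hj2
          · have : j = m := by omega
            subst this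
            exact absurd ((hitB_at q color k i j hcm).mp hB) hcond
          · exact ⟨j, by omega, hB⟩
    · rw [if_neg hx] at hr
      have hcmf : cm q color i (m : Int) = false := by
        unfold cm
        simp only [Bool.and_eq_false_iff, decide_eq_false_iff_not]
        right
        rw [Int.toNat_natCast, List.getD_eq_getElem _ _ hlt]
        exact hx
      have e1 : (m : Int) + 1 = ((m + 1 : Nat) : Int) := by push_cast; ring
      have e2 : (0 : Int) = ((hpre q color i (m+1) : Nat) : Int) := by
        simp only [hpre]
        rw [hrun_eq, hcmf]
        simp
      rw [e1, e2] at hr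
      have hshift : ∀ (dc : Int) (w : PySem.Dict Int Int),
          (∀ j : Int, w.getD j 0 = if 0 ≤ j ∧ j < (m : Int) then (brun q color dc i j : Int) else 0) →
          (∀ j : Int, w.getD j 0 = if 0 ≤ j ∧ j < ((m + 1 : Nat) : Int) then (brun q color dc i j : Int) else 0) := by
        intro dc w hw j
        rw [hw j]
        by_cases hj : 0 ≤ j ∧ j < (m : Int)
        · rw [if_pos hj, if_pos (by push_cast; omega)]
        · rw [if_neg hj]
          by_cases hj2 : 0 ≤ j ∧ j < ((m + 1 : Nat) : Int)
          · rw [if_pos hj2]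
            have : j = (m : Int) := by push_cast at hj2; omega
            subst this
            rw [brun_zero q color dc i _ hcmf]
            simp
          · rw [if_neg hj2]
      obtain ⟨hiff, hdicts⟩ := ih (m+1) (by omega) (by omega) _ _ _ (hshift 0 nv hnv) (hshift (-1) nd hnd) (hshift 1 na hna) r hr
      refine ⟨?_, hdicts⟩
      rw [hiff]
      constructor
      · rintro ⟨j, hj, hB⟩
        exact ⟨j, by omega, hB⟩
      · rintro ⟨j, hj, hB⟩
        rcases Nat.lt_or_ge j (m+1) with hj2 | hj2
        · have : j = m := by omega
          subst this
          exact absurd hB (hitB_false q color k i j hcmf)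
        · exact ⟨j, by omega, hB⟩

lemma gridLoop_iff (q : List (List Int)) (color k : Int) :
    ∀ (rest : List (List Int)) (i : Nat), rest = q.drop i →
      ∀ (v d a : PySem.Dict Int Int)
        (hv : ∀ j : Int, v.getD j 0 = (prun q color 0 i j : Int))
        (hd : ∀ j : Int, d.getD j 0 = (prun q color (-1) i j : Int))
        (ha : ∀ j : Int, a.getD j 0 = (prun q color 1 i j : Int)),
        (gridLoopB color k rest v d a = true ↔ ∃ ii jj : Nat, i ≤ ii ∧ hitB q color k ii jj) := by
  intro rest
  induction rest with
  | nil =>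
    intro i hdrop v d a hv hd ha
    have hlen : q.length ≤ i := by
      by_contra hcon
      push_neg at hcon
      have := congrArg List.length hdrop
      simp [List.length_drop] at this
      omega
    simp only [gridLoopB, Bool.false_eq_true, false_iff]
    rintro ⟨ii, jj, hii, hB⟩
    have hb := cm_bounds q color ii (jj : Int) hB.1
    omega
  | cons row rest' ihr =>
    intro i hdrop v d a hv hd ha
    have hi : i < q.length := by
      by_contra hcon
      push_neg at hcon
      rw [List.drop_eq_nil_of_le hcon] at hdrop
      cases hdrop
    have hrow : row = q.getD i [] := by
      rw [List.drop_eq_getElem_cons hi] at hdrop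
      rw [List.getD_eq_getElem _ _ hi]
      exact (List.cons.injEq _ _ _ _ ▸ hdrop).1
    have hrest : rest' = q.drop (i+1) := by
      rw [List.drop_eq_getElem_cons hi] at hdrop
      exact (List.cons.injEq _ _ _ _ ▸ hdrop).2
    have hempty : ∀ (dc : Int) (j : Int), (PySem.Dict.empty : PySem.Dict Int Int).getD j 0 =
        if 0 ≤ j ∧ j < ((0 : Nat) : Int) then (brun q color dc i j : Int) else 0 := by
      intro dc j
      rw [PySem.Dict.getD_empty]
      rw [if_neg (by push_cast; omega)]
    obtain ⟨hiff, hdicts⟩ := rowLoop_iff q color k i hi v d a hv hd ha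
      ((q.getD i []).length) 0 (by omega) (by omega)
      PySem.Dict.empty PySem.Dict.empty PySem.Dict.empty
      (hempty 0) (hempty (-1)) (hempty 1)
      (rowLoopB color k v d a ((q.getD i []).drop 0) ((0 : Nat) : Int) ((hpre q color i 0 : Nat) : Int)
        PySem.Dict.empty PySem.Dict.empty PySem.Dict.empty) rfl
    have hcall : rowLoopB color k v d a ((q.getD i []).drop 0) ((0 : Nat) : Int) ((hpre q color i 0 : Nat) : Int)
        PySem.Dict.empty PySem.Dict.empty PySem.Dict.empty
        = rowLoopB color k v d a row 0 0 PySem.Dict.empty PySem.Dict.empty PySem.Dict.empty := by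
      rw [hrow, List.drop_zero]
      norm_num [hpre]
    rw [hcall] at hiff hdicts
    simp only [gridLoopB]
    rcases hres : rowLoopB color k v d a row 0 0 PySem.Dict.empty PySem.Dict.empty PySem.Dict.empty with ⟨b, nv, nd, na⟩
    rw [hres] at hiff hdicts
    cases b with
    | true =>
      simp only [true_iff] at hiff ⊢
      obtain ⟨j, _, hB⟩ := hiff
      exact ⟨i, j, le_refl i, hB⟩
    | false =>
      simp only [Bool.false_eq_true, false_iff, not_exists] at hiff
      obtain ⟨hnv, hnd, hna⟩ := hdicts rfl
      have hprun : ∀ (dc : Int) (j : Int), (brun q color dc i j : Int) = (prun q color dc (i+1) j : Int) := by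
        intro dc j
        simp [prun]
      rw [ihr (i+1) (by rw [hrest]) nv nd na
        (fun j => by rw [hnv j, hprun 0 j]) (fun j => by rw [hnd j, hprun (-1) j]) (fun j => by rw [hna j, hprun 1 j])]
      constructor
      · rintro ⟨ii, jj, hii, hB⟩
        exact ⟨ii, jj, by omega, hB⟩
      · rintro ⟨ii, jj, hii, hB⟩
        rcases Nat.lt_or_ge ii (i+1) with h2 | h2
        · have : ii = i := by omega
          subst this
          exact absurd hB (hiff jj ∘ fun h => ⟨Nat.zero_le jj, h⟩)
        · exact ⟨ii, jj, h2, hB⟩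

lemma search_alt_iff (q : List (List Int)) (color k : Int) :
    search_alt q color k = true ↔ ∃ i j : Nat, hitB q color k i j := by
  unfold search_alt
  have hempty : ∀ (dc : Int) (j : Int), (PySem.Dict.empty : PySem.Dict Int Int).getD j 0 = (prun q color dc 0 j : Int) := by
    intro dc j
    rw [PySem.Dict.getD_empty]
    simp [prun]
  rw [gridLoop_iff q color k q 0 (by simp) PySem.Dict.empty PySem.Dict.empty PySem.Dict.empty
    (hempty 0) (hempty (-1)) (hempty 1)]
  constructor
  · rintro ⟨i, j, _, hB⟩; exact ⟨i, j, hB⟩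
  · rintro ⟨i, j, hB⟩; exact ⟨i, j, Nat.zero_le i, hB⟩

lemma brun_char (q : List (List Int)) (col dc : Int) :
    ∀ (i : Nat) (n : Nat) (j : Int),
      n ≤ brun q col dc i j ↔ (n ≤ i + 1 ∧ ∀ t < n, cm q col (i - t) (j + (t : Int) * dc) = true) := by
  intro i
  induction i with
  | zero =>
    intro n j
    cases n with
    | zero => simp
    | succ n =>
      by_cases hc : cm q col 0 j = true
      · simp only [brun, hc, if_true]
        constructor
        · intro h
          refine ⟨by omega, ?_⟩
          intro t ht
          have ht0 : t = 0 := by omega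
          subst ht0
          simpa using hc
        · rintro ⟨h1, h2⟩
          omega
      · simp only [brun, Bool.not_eq_true] at hc
        simp only [brun, hc, Bool.false_eq_true, if_false]
        constructor
        · intro h; omega
        · rintro ⟨h1, h2⟩
          have := h2 0 (by omega)
          simp [hc] at this
  | succ i ih =>
    intro n j
    cases n with
    | zero => simp
    | succ n =>
      by_cases hc : cm q col (i+1) j = true
      · simp only [brun, hc, if_true]
        constructor
        · intro h
          have h' : n ≤ brun q col dc i (j + dc) := by omega
          obtain ⟨ha, hb⟩ := (ih n (j + dc)).mp h'
          refine ⟨by omega, ?_⟩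
          intro t ht
          cases t with
          | zero => simpa using hc
          | succ s =>
            have := hb s (by omega)
            have e1 : i + 1 - (s + 1) = i - s := by omega
            have e2 : j + ((s:Int) + 1) * dc = j + dc + (s:Int) * dc := by ring
            rw [e1]
            push_cast
            rw [e2]
            exact this
        · rintro ⟨h1, h2⟩
          have h' : n ≤ brun q col dc i (j + dc) := by
            apply (ih n (j + dc)).mpr
            refine ⟨by omega, ?_⟩
            intro t ht
            have := h2 (t+1) (by omega)
            have e1 : i + 1 - (t + 1) = i - t := by omega
            have e2 : j + ((t:Int) + 1) * dc = j + dc + (t:Int) * dc := by ring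
            rw [e1] at this
            push_cast at this
            rw [e2] at this
            exact this
          omega
      · simp only [Bool.not_eq_true] at hc
        simp only [brun, hc, Bool.false_eq_true, if_false]
        constructor
        · intro h; omega
        · rintro ⟨h1, h2⟩
          have := h2 0 (by omega)
          simp [hc] at this

lemma hrun_char (q : List (List Int)) (col : Int) (i : Nat) :
    ∀ (j : Nat) (n : Nat),
      n ≤ hrun q col i j ↔ (n ≤ j + 1 ∧ ∀ t < n, cm q col i ((j : Int) - (t : Int)) = true) := by
  intro j
  induction j with
  | zero =>
    intro n
    cases n with
    | zero => simp
    | succ n =>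
      by_cases hc : cm q col i 0 = true
      · simp only [hrun, hc, if_true]
        constructor
        · intro h
          refine ⟨by omega, ?_⟩
          intro t ht
          have ht0 : t = 0 := by omega
          subst ht0
          simpa using hc
        · rintro ⟨h1, h2⟩
          omega
      · simp only [Bool.not_eq_true] at hc
        simp only [hrun, hc, Bool.false_eq_true, if_false]
        constructor
        · intro h; omega
        · rintro ⟨h1, h2⟩
          have := h2 0 (by omega)
          simp [hc] at this
  | succ j ih =>
    intro n
    cases n with
    | zero => simp
    | succ n =>
      by_cases hc : cm q col i ((j:Int)+1) = true
      · simp only [hrun, hc, if_true]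
        constructor
        · intro h
          have h' : n ≤ hrun q col i j := by omega
          obtain ⟨ha, hb⟩ := (ih n).mp h'
          refine ⟨by omega, ?_⟩
          intro t ht
          cases t with
          | zero =>
            have : ((j+1 : Nat) : Int) - (0:Nat) = (j:Int) + 1 := by push_cast; ring
            rw [this]
            exact hc
          | succ s =>
            have := hb s (by omega)
            have e : ((j+1 : Nat) : Int) - ((s+1 : Nat) : Int) = (j:Int) - (s:Int) := by push_cast; ring
            rw [e]
            exact this
        · rintro ⟨h1, h2⟩
          have h' : n ≤ hrun q col i j := by
            apply (ih n).mpr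
            refine ⟨by omega, ?_⟩
            intro t ht
            have := h2 (t+1) (by omega)
            have e : ((j+1 : Nat) : Int) - ((t+1 : Nat) : Int) = (j:Int) - (t:Int) := by push_cast; ring
            rw [e] at this
            exact this
          omega
      · simp only [Bool.not_eq_true] at hc
        simp only [hrun, hc, Bool.false_eq_true, if_false]
        constructor
        · intro h; omega
        · rintro ⟨h1, h2⟩
          have := h2 0 (by omega)
          have e : ((j+1 : Nat) : Int) - ((0 : Nat) : Int) = (j:Int) + 1 := by push_cast; ring
          rw [e] at this
          simp [hc] at this

-- backward-run ≥ n at some colored cell  ↔  forward run of n cells, vertical/diagonal direction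
lemma bridge_diag (q : List (List Int)) (col dc : Int) (n : Nat) :
    (∃ i : Nat, ∃ j : Int, cm q col i j = true ∧ n ≤ brun q col dc i j) ↔
    (∃ i : Nat, ∃ j : Int, cm q col i j = true ∧ fwdP q col i j 1 (-dc) n) := by
  constructor
  · rintro ⟨i, j, hcm, hb⟩
    obtain ⟨hbound, hall⟩ := (brun_char q col dc i n j).mp hb
    cases n with
    | zero => exact ⟨i, j, hcm, fun t ht => absurd ht (by omega)⟩
    | succ n =>
      refine ⟨i - n, j + (n : Int) * dc, hall n (by omega), ?_⟩
      intro t ht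
      have h := hall (n - t) (by omega)
      have e1 : i - n + t * 1 = i - (n - t) := by omega
      have e2 : j + (n : Int) * dc + (t : Int) * (-dc) = j + ((n - t : Nat) : Int) * dc := by
        rw [Nat.cast_sub (by omega)]; ring
      rw [e1, e2]
      exact h
  · rintro ⟨i, j, hcm, hf⟩
    cases n with
    | zero => exact ⟨i, j, hcm, by omega⟩
    | succ n =>
      have hend := hf n (by omega)
      rw [show i + n * 1 = i + n by ring] at hend
      refine ⟨i + n, j + (n : Int) * (-dc), hend, ?_⟩
      apply (brun_char q col dc (i + n) (n+1) _).mpr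
      refine ⟨by omega, ?_⟩
      intro t ht
      have h := hf (n - t) (by omega)
      have e1 : i + n - t = i + (n - t) * 1 := by omega
      have e2 : j + (n : Int) * (-dc) + (t : Int) * dc = j + ((n - t : Nat) : Int) * (-dc) := by
        rw [Nat.cast_sub (by omega)]; ring
      rw [e1, e2]
      exact h

lemma bridge_horiz (q : List (List Int)) (col : Int) (n : Nat) :
    (∃ i j : Nat, cm q col i (j : Int) = true ∧ n ≤ hrun q col i j) ↔
    (∃ i : Nat, ∃ j : Int, cm q col i j = true ∧ fwdP q col i j 0 1 n) := by
  constructor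
  · rintro ⟨i, j, hcm, hb⟩
    obtain ⟨hbound, hall⟩ := (hrun_char q col i j n).mp hb
    cases n with
    | zero => exact ⟨i, (j : Int), hcm, fun t ht => absurd ht (by omega)⟩
    | succ n =>
      refine ⟨i, (j : Int) - (n : Int), hall n (by omega), ?_⟩
      intro t ht
      have h := hall (n - t) (by omega)
      have e1 : i + t * 0 = i := by omega
      have e2 : (j : Int) - (n : Int) + (t : Int) * 1 = (j : Int) - ((n - t : Nat) : Int) := by
        rw [Nat.cast_sub (by omega)]; ring
      rw [e1, e2]
      exact h
  · rintro ⟨i, j, hcm, hf⟩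
    obtain ⟨_, hj0, _, _⟩ := cm_bounds q col i j hcm
    cases n with
    | zero =>
      refine ⟨i, j.toNat, ?_, by omega⟩
      rw [Int.toNat_of_nonneg hj0]
      exact hcm
    | succ n =>
      have hend := hf n (by omega)
      rw [show i + n * 0 = i by omega] at hend
      refine ⟨i, j.toNat + n, ?_, ?_⟩
      · rw [show ((j.toNat + n : Nat) : Int) = j + (n : Int) * 1 by rw [Nat.cast_add, Int.toNat_of_nonneg hj0]; ring]
        exact hend
      · apply (hrun_char q col i (j.toNat + n) (n+1)).mpr
        refine ⟨by omega, ?_⟩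
        intro t ht
        have h := hf (n - t) (by omega)
        have e1 : i + (n - t) * 0 = i := by omega
        have e2 : ((j.toNat + n : Nat) : Int) - (t : Int) = j + ((n - t : Nat) : Int) * 1 := by
          rw [Nat.cast_add, Nat.cast_sub (by omega), Int.toNat_of_nonneg hj0]; ring
        rw [e1, e2] at *
        exact h

lemma hit_iff (q : List (List Int)) (color k : Int) (hk : 0 ≤ k) :
    (∃ i j : Nat, hitB q color k i j) ↔ (∃ i j : Nat, hitA q color k.toNat i j) := by
  have hb0 := bridge_diag q color 0 k.toNat
  simp only [neg_zero] at hb0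
  have hbm := bridge_diag q color (-1) k.toNat
  simp only [neg_neg] at hbm
  have hbp := bridge_diag q color 1 k.toNat
  have hbh := bridge_horiz q color k.toNat
  have toNatJ : ∀ (i : Nat) (j : Int) (Φ : Int → Prop), cm q color i j = true → Φ j →
      ∃ jn : Nat, cm q color i (jn : Int) = true ∧ Φ (jn : Int) := by
    intro i j Φ hcm hΦ
    obtain ⟨_, hj0, _, _⟩ := cm_bounds q color i j hcm
    exact ⟨j.toNat, by rw [Int.toNat_of_nonneg hj0]; exact ⟨hcm, hΦ⟩⟩
  constructor
  · rintro ⟨i, j, hcm, hd⟩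
    rcases hd with h | h | h | h
    · obtain ⟨i', j', hcm', hf⟩ := hbh.mp ⟨i, j, hcm, by omega⟩
      obtain ⟨jn, hcm2, hf2⟩ := toNatJ i' j' (fun z => fwdP q color i' z 0 1 k.toNat) hcm' hf
      exact ⟨i', jn, hcm2, Or.inl hf2⟩
    · obtain ⟨i', j', hcm', hf⟩ := hb0.mp ⟨i, (j : Int), hcm, by omega⟩
      obtain ⟨jn, hcm2, hf2⟩ := toNatJ i' j' (fun z => fwdP q color i' z 1 0 k.toNat) hcm' hf
      exact ⟨i', jn, hcm2, Or.inr (Or.inr (Or.inr hf2))⟩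
    · obtain ⟨i', j', hcm', hf⟩ := hbm.mp ⟨i, (j : Int), hcm, by omega⟩
      obtain ⟨jn, hcm2, hf2⟩ := toNatJ i' j' (fun z => fwdP q color i' z 1 1 k.toNat) hcm' hf
      exact ⟨i', jn, hcm2, Or.inr (Or.inr (Or.inl hf2))⟩
    · obtain ⟨i', j', hcm', hf⟩ := hbp.mp ⟨i, (j : Int), hcm, by omega⟩
      obtain ⟨jn, hcm2, hf2⟩ := toNatJ i' j' (fun z => fwdP q color i' z 1 (-1) k.toNat) hcm' hf
      exact ⟨i', jn, hcm2, Or.inr (Or.inl hf2)⟩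
  · rintro ⟨i, j, hcm, hd⟩
    rcases hd with h | h | h | h
    · obtain ⟨i', j', hcm', hr⟩ := hbh.mpr ⟨i, (j : Int), hcm, h⟩
      exact ⟨i', j', hcm', Or.inl (by omega)⟩
    · obtain ⟨i', j', hcm', hr⟩ := hbp.mpr ⟨i, (j : Int), hcm, h⟩
      obtain ⟨jn, hcm2, hr2⟩ := toNatJ i' j' (fun z => k.toNat ≤ brun q color 1 i' z) hcm' hr
      exact ⟨i', jn, hcm2, Or.inr (Or.inr (Or.inr (by omega)))⟩
    · obtain ⟨i', j', hcm', hr⟩ := hbm.mpr ⟨i, (j : Int), hcm, h⟩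
      obtain ⟨jn, hcm2, hr2⟩ := toNatJ i' j' (fun z => k.toNat ≤ brun q color (-1) i' z) hcm' hr
      exact ⟨i', jn, hcm2, Or.inr (Or.inr (Or.inl (by omega)))⟩
    · obtain ⟨i', j', hcm', hr⟩ := hb0.mpr ⟨i, (j : Int), hcm, h⟩
      obtain ⟨jn, hcm2, hr2⟩ := toNatJ i' j' (fun z => k.toNat ≤ brun q color 0 i' z) hcm' hr
      exact ⟨i', jn, hcm2, Or.inr (Or.inl (by omega))⟩

-- ===== VERDICT (by name: the statement is the Claim_ definition above) =====
theorem search_spec : Claim_equal_search := by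
  intro q color k _ hk
  unfold Spec_search
  rw [Bool.eq_iff_iff, search_iff q color k hk, search_alt_iff, hit_iff q color k hk]
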